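-- pv_equiv track=rewrite | github.com/Samuel-Patel/Graphing-Calculator | list_conversion_algorithms.py | tokenisation
-- ===== SOURCE A (Python) =====
-- from copy import copy
--
-- def string_to_list(strng):
--     output = []     # creates an empty list and adds the
--     for i in strng:  # elements of the string to the
--         output.append(i)    # empty list one by one
--     return output
--
-- def tokenisation(expression_string, key_elements):
--     if len(key_elements) == 0:  # checks if the stack is empty, the string has no key elements
--         return string_to_list(expression_string)    # returns string converted to a list
--
--     element = key_elements.pop()    # gets element at the top of the stack
--     split_string = expression_string.split(sep=element)  # removes the element from the list and returns an
--     # list containing the two substrings on either side of the element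
--
--     if len(split_string) == 1:  # if the list has one element then the element was not in the string
--         return tokenisation(split_string[0], key_elements)  # repeats process with other key elements
--
--     expression_list = []
--     for i in range(len(split_string)-1):    # goes through all substrings adding the element between them
--         expression_list += tokenisation(split_string[i], copy(key_elements)) + [element]  # adds converted substrings to list
--     expression_list += tokenisation(split_string[-1], copy(key_elements))  # goes through last substring
--     return expression_list
-- ===== SOURCE B (Python) =====
-- def tokenisation(expression_string, key_elements):
--     # Iterative worklist: fold over the keys in pop order over a flat list of
--     # tagged segments (token vs raw text), then explode raw text into chars.
--     # Does not mutate key_elements (A pops from it); return value only.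
--     items = [(False, expression_string)]
--     for element in reversed(key_elements):
--         new_items = []
--         for is_token, text in items:
--             if is_token:
--                 new_items.append((True, text))
--             else:
--                 parts = text.split(element)
--                 for j, part in enumerate(parts):
--                     if j:
--                         new_items.append((True, element))
--                     new_items.append((False, part))
--         items = new_items
--     out = []
--     for is_token, text in items:
--         if is_token:
--             out.append(text)
--         else:
--             out.extend(text)
--     return out
-- ===== Notes on version B (the rewrite author's own statement) =====
-- stated objective: alternative
-- what changed: Replaces A's branching recursion (re-splitting each substring and copying the remaining key list per piece) with a single iterative worklist: one pass per key over a flat list of tagged segments, then one final pass exploding raw text into characters; B also does not mutate key_elements where A pops from it.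
import Mathlib
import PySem

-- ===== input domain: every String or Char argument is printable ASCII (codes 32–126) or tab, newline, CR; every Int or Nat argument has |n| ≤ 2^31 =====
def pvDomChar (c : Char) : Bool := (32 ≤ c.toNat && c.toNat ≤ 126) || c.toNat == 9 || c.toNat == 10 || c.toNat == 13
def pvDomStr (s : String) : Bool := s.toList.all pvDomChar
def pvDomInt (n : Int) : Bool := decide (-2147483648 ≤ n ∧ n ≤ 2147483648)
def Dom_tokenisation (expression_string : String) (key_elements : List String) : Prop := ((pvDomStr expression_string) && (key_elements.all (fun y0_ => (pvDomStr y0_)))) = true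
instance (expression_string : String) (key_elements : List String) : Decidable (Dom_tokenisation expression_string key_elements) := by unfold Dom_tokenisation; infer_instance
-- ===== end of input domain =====

-- B replaces A's branching recursion (which re-splits and copies the key list per substring)
-- by one iterative worklist pass over the keys; return value only: Python A pops from
-- key_elements (caller-visible mutation), B does not mutate it.

-- ===== PORT A =====
-- s.split(sep=e): Python raises ValueError for e = "" (split? = none there; excluded by Pre_)
def pySplit (s sep : String) : List String :=
  (PySem.Str.split? s sep).getD []

def stringToList (strng : String) : List String :=
  strng.toList.foldl (fun output i => output ++ [String.singleton i]) []

def tokenisation (expression_string : String) (key_elements : List String) : List String :=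
  if h : key_elements = [] then      -- len(key_elements) == 0
    stringToList expression_string
  else
    let element := key_elements.getLast h        -- key_elements.pop()
    let rest := key_elements.dropLast
    let split_string := pySplit expression_string element
    if split_string.length = 1 then
      tokenisation (split_string.headD "") rest
    else
      -- for i in range(len(split_string)-1): expression_list += tokenisation(split_string[i], copy) + [element]
      let pieces := split_string.map (fun sub => tokenisation sub rest)
      (List.range (split_string.length - 1)).foldl
        (fun expression_list i => expression_list ++ pieces.getD i [] ++ [element]) []
        ++ pieces.getLastD []                    -- += tokenisation(split_string[-1], copy)
termination_by key_elements.length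
decreasing_by all_goals
  simp only [List.length_dropLast]
  have := List.length_pos_iff.mpr h
  omega

-- ===== PORT B =====
-- inner loop of Source B: one pass over the tagged segments, splitting raw text by element
def tokStep (element : String) (items : List (Bool × String)) : List (Bool × String) :=
  items.foldl (fun new_items it =>
    if it.1 then new_items ++ [(true, it.2)]
    else (pySplit it.2 element).zipIdx.foldl
        (fun acc pj => (acc ++ (if pj.2 ≠ 0 then [(true, element)] else [])) ++ [(false, pj.1)])
        new_items) []

-- final loop of Source B: tokens kept whole, raw text exploded into characters
def tokFinish (items : List (Bool × String)) : List String :=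
  items.foldl (fun out it =>
    if it.1 then out ++ [it.2] else out ++ it.2.toList.map String.singleton) []

def tokenisation_alt (expression_string : String) (key_elements : List String) : List String :=
  tokFinish (key_elements.reverse.foldl (fun items element => tokStep element items)
    [(false, expression_string)])

-- ===== PRECONDITION & SPEC =====
-- Pre_ excludes exactly the inputs where Python A raises: an empty string among the key
-- elements makes str.split('') raise ValueError (every key is eventually popped).
def Pre_tokenisation (expression_string : String) (key_elements : List String) : Prop :=
  "" ∉ key_elements
instance (expression_string : String) (key_elements : List String) : Decidable (Pre_tokenisation expression_string key_elements) := by unfold Pre_tokenisation; infer_instance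

def pvWitness_tokenisation : String × List String := ("1+2*3", ["+", "*"])

def Spec_tokenisation (expression_string : String) (key_elements : List String) (out : List String) : Prop := out = tokenisation_alt expression_string key_elements
instance (expression_string : String) (key_elements : List String) (out : List String) : Decidable (Spec_tokenisation expression_string key_elements out) := by unfold Spec_tokenisation; infer_instance

-- ===== CLAIM (what is proved, stated in full; the proofs are below) =====
def Claim_equal_tokenisation : Prop := ∀ (expression_string : String) (key_elements : List String), Dom_tokenisation expression_string key_elements → Pre_tokenisation expression_string key_elements → Spec_tokenisation expression_string key_elements (tokenisation expression_string key_elements)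

-- ===== LEMMAS AND PROOFS =====

-- the value a tagged segment contributes to the final answer, given the keys still to process
def segVal (es : List String) (it : Bool × String) : List String :=
  if it.1 then [it.2] else tokenisation it.2 es.reverse

-- what one application of tokStep turns a single tagged segment into
def stepF (e : String) (it : Bool × String) : List (Bool × String) :=
  if it.1 then [(true, it.2)]
  else (pySplit it.2 e).zipIdx.flatMap
    (fun pj => (if pj.2 ≠ 0 then [(true, e)] else []) ++ [(false, pj.1)])

theorem tokenisation_nil (s : String) :
    tokenisation s [] = s.toList.map String.singleton := by
  rw [tokenisation, dif_pos rfl]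
  unfold stringToList
  rw [PySem.List.foldl_append_singleton_eq_map]
  rfl

theorem intercalate_cons_flatMap (e : String) (x : List String) (xs : List (List String)) :
    List.intercalate [e] (x :: xs) = x ++ xs.flatMap (fun y => e :: y) := by
  induction xs generalizing x with
  | nil => simp [List.intercalate]
  | cons y ys ih =>
      rw [List.flatMap_cons]
      have : List.intercalate [e] (x :: y :: ys) = x ++ [e] ++ List.intercalate [e] (y :: ys) := by
        simp [List.intercalate]
      rw [this, ih y]
      simp

theorem loopA_eq_intercalate (e : String) (l : List (List String)) (hl : l ≠ []) :
    (List.range (l.length - 1)).foldl (fun acc i => acc ++ l.getD i [] ++ [e]) []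
      ++ l.getLastD []
    = List.intercalate [e] l := by
  induction l with
  | nil => exact absurd rfl hl
  | cons p ps ih =>
      cases ps with
      | nil => simp [List.intercalate]
      | cons q qs =>
          have hlen : (p :: q :: qs).length - 1 = (q :: qs).length := by simp
          rw [hlen]
          have hr : List.range (q :: qs).length = 0 :: (List.range ((q :: qs).length - 1)).map Nat.succ := by
            simp [List.range_succ_eq_map]
          rw [hr]
          simp only [List.foldl_cons, List.foldl_map]
          have step : ∀ (a : List String),
              (List.range ((q :: qs).length - 1)).foldl
                (fun acc i => acc ++ (p :: q :: qs).getD i.succ [] ++ [e]) a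
              = a ++ (List.range ((q :: qs).length - 1)).foldl
                (fun acc i => acc ++ (q :: qs).getD i [] ++ [e]) [] := by
            intro a
            have h1 := PySem.List.foldl_append_eq_flatMap
              (fun i => (q :: qs).getD i [] ++ [e]) (List.range ((q :: qs).length - 1)) a
            have h2 := PySem.List.foldl_append_eq_flatMap
              (fun i => (q :: qs).getD i [] ++ [e]) (List.range ((q :: qs).length - 1)) ([] : List String)
            simp only [List.append_assoc] at h1 h2 ⊢
            simp only [List.getD_cons_succ]
            rw [h1, h2]
            simp
          rw [step]
          rw [intercalate_cons_flatMap]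
          have ihe := ih (by simp)
          rw [intercalate_cons_flatMap] at ihe
          simp only [List.nil_append, List.getD_cons_zero, List.append_assoc] at ihe ⊢
          rw [List.getLastD_eq_getLast?, List.getLast?_cons_cons, ← List.getLastD_eq_getLast?]
          rw [ihe]
          simp

theorem tokenisation_concat (s e : String) (ks : List String) :
    tokenisation s (ks ++ [e])
      = List.intercalate [e] ((pySplit s e).map (fun p => tokenisation p ks)) := by
  rw [tokenisation]
  have hne : ks ++ [e] ≠ [] := by simp
  rw [dif_neg hne]
  simp only [List.getLast_append_singleton, List.dropLast_concat]
  rcases hsp : pySplit s e with _ | ⟨t, ts⟩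
  · simp [List.intercalate]
  · rcases ts with _ | ⟨u, us⟩
    · simp [List.intercalate]
    · have hlen : (t :: u :: us).length ≠ 1 := by simp
      rw [if_neg hlen]
      have h := loopA_eq_intercalate e ((t :: u :: us).map (fun sub => tokenisation sub ks)) (by simp)
      simp only [List.length_map] at h
      exact h

theorem zipIdx_flatMap_pos (e : String) (ps : List String) (k : Nat) (hk : k ≠ 0) :
    (ps.zipIdx k).flatMap
        (fun pj => (if pj.2 ≠ 0 then [(true, e)] else []) ++ [(false, pj.1)])
      = ps.flatMap (fun q => [(true, e), (false, q)]) := by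
  induction ps generalizing k with
  | nil => simp
  | cons q qs ih =>
      rw [List.zipIdx_cons, List.flatMap_cons, List.flatMap_cons]
      rw [if_pos hk, ih (k + 1) (by omega)]
      simp

-- one raw-text segment, one key: split into tagged pieces, then value the pieces
theorem seg_step (e : String) (es : List String) (t : String) :
    (stepF e (false, t)).flatMap (segVal es) = tokenisation t (es.reverse ++ [e]) := by
  rw [tokenisation_concat]
  unfold stepF
  simp only [if_neg (by simp : ¬ ((false, t).1 = true))]
  rcases hsp : pySplit t e with _ | ⟨p, ps⟩
  · simp [List.intercalate]
  · rw [List.zipIdx_cons, List.flatMap_cons, if_neg (by simp)]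
    rw [zipIdx_flatMap_pos e ps 1 (by omega)]
    rw [List.map_cons, intercalate_cons_flatMap]
    simp only [List.nil_append, List.flatMap_append, List.flatMap_assoc, List.flatMap_cons,
      List.flatMap_nil]
    simp [segVal, List.flatMap_map]

theorem tokStep_eq_flatMap (e : String) (items : List (Bool × String)) :
    tokStep e items = items.flatMap (stepF e) := by
  unfold tokStep
  have hbody : ∀ (a : List (Bool × String)) (it : Bool × String),
      (if it.1 then a ++ [(true, it.2)]
       else (pySplit it.2 e).zipIdx.foldl
         (fun acc pj => (acc ++ (if pj.2 ≠ 0 then [(true, e)] else [])) ++ [(false, pj.1)]) a)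
      = a ++ stepF e it := by
    intro a it
    by_cases h1 : it.1
    · simp [stepF, h1]
    · simp only [if_neg h1, stepF]
      have h := PySem.List.foldl_append_eq_flatMap
        (fun pj : String × Nat => (if pj.2 ≠ 0 then [((true : Bool), e)] else []) ++ [((false : Bool), pj.1)])
        (pySplit it.2 e).zipIdx a
      simp only [List.append_assoc] at h ⊢
      rw [h]
  have hfun : (fun (new_items : List (Bool × String)) (it : Bool × String) =>
      if it.1 then new_items ++ [(true, it.2)]
      else (pySplit it.2 e).zipIdx.foldl
        (fun acc pj => (acc ++ (if pj.2 ≠ 0 then [(true, e)] else [])) ++ [(false, pj.1)]) new_items)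
      = (fun a it => a ++ stepF e it) := by
    funext a it
    exact hbody a it
  rw [hfun, PySem.List.foldl_append_eq_flatMap]
  simp

theorem tokFinish_eq_flatMap (items : List (Bool × String)) :
    tokFinish items
      = items.flatMap (fun it =>
          if it.1 then [it.2] else it.2.toList.map String.singleton) := by
  unfold tokFinish
  have hfun : (fun (out : List String) (it : Bool × String) =>
      if it.1 then out ++ [it.2] else out ++ it.2.toList.map String.singleton)
      = (fun out it => out ++ (if it.1 then [it.2] else it.2.toList.map String.singleton)) := by
    funext out it
    by_cases h1 : it.1 <;> simp [h1]
  rw [hfun, PySem.List.foldl_append_eq_flatMap]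
  simp

theorem main_loop (es : List String) (items : List (Bool × String)) :
    tokFinish (es.foldl (fun items element => tokStep element items) items)
      = items.flatMap (segVal es) := by
  induction es generalizing items with
  | nil =>
      rw [List.foldl_nil, tokFinish_eq_flatMap]
      apply List.flatMap_congr
      intro it _
      by_cases h1 : it.1 <;> simp [segVal, h1, tokenisation_nil]
  | cons e es' ih =>
      rw [List.foldl_cons, ih, tokStep_eq_flatMap, List.flatMap_assoc]
      apply List.flatMap_congr
      intro it _
      by_cases h1 : it.1
      · obtain ⟨b, t⟩ := it
        simp only at h1
        subst h1
        simp [segVal, stepF]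
      · obtain ⟨b, t⟩ := it
        simp only at h1
        have hb : b = false := by
          cases b
          · rfl
          · exact absurd rfl h1
        subst hb
        rw [seg_step]
        simp [segVal]

-- ===== VERDICT (by name: the statement is the Claim_ definition above) =====
theorem tokenisation_spec : Claim_equal_tokenisation := by
  intro s ks _ _
  unfold Spec_tokenisation tokenisation_alt
  rw [main_loop]
  simp [segVal]
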